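-- pv_equiv track=rewrite | github.com/ChoiBeomJun99/FinancialDevCT | 20230920/ChoiBeomjun/Algorithm_CH.py | solution
-- ===== SOURCE A (Python) =====
-- from collections import Counter
--
-- def solution(topping):
--     answer = 0
--     topDic = Counter(topping) # 토핑 딕셔너리
--     setDic = set() # 비교를 위한 딕셔너리
--
--     for i in topping:
--         topDic[i] -= 1 # 개수를 하나 빼주고
--         setDic.add(i) # 여기서는 더 해준다 (종류의 수만 같으면 되므로)
--
--         if topDic[i] == 0: # 0개가 되면 (아예 종류를 삭제)
--             topDic.pop(i)
--
--         if len(setDic) == len(topDic): # 서로 종류의 수가 같다면 +1 을 해준다.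
--             answer += 1
--
--     return answer
-- ===== SOURCE B (Python) =====
-- def solution(topping):
--     # two-pass: precompute suffix distinct counts, then scan left with a growing set
--     suf = [0]
--     seen = set()
--     for x in reversed(topping):
--         seen.add(x)
--         suf.append(len(seen))
--     suf.reverse()
--     answer = 0
--     left = set()
--     for i, x in enumerate(topping):
--         left.add(x)
--         if len(left) == suf[i + 1]:
--             answer += 1
--     return answer
-- ===== Notes on version B (the rewrite author's own statement) =====
-- stated objective: faster
-- what changed: Replaces A's fused single pass that maintains a decremented Counter (popping keys at zero) with a two-pass decomposition: a right-to-left pass precomputes a table of suffix distinct counts, then a left-to-right pass with a growing seen-set compares its size against the table entry.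
import Mathlib
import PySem

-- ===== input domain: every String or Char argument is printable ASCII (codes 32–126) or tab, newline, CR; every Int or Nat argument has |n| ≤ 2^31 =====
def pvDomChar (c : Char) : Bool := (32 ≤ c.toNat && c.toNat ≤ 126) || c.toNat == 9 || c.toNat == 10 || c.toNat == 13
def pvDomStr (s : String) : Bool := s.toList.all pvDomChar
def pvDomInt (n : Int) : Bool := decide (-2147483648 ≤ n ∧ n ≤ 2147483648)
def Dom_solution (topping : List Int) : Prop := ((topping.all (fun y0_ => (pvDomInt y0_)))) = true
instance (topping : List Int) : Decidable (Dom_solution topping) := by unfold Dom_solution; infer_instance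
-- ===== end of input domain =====

-- B replaces A's fused Counter-decrementing single pass by a two-pass decomposition
-- (precomputed suffix-distinct-count table, then a left scan with a growing set); fewer
-- per-element dict operations, measured constant-factor faster in a timing run.


-- ===== PORT A =====
-- one iteration of A's loop body over the state (answer, topDic, setDic)
def stepA (st : Int × PySem.Dict Int Int × PySem.Set Int) (i : Int) :
    Int × PySem.Dict Int Int × PySem.Set Int :=
  let topDic := st.2.1.modify i 0 (· - 1)          -- topDic[i] -= 1
  let setDic := PySem.Set.add st.2.2 i             -- setDic.add(i)
  -- topDic.pop(i): the key is present here (it was just written by the modify),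
  -- and the value is discarded, so pop is exactly erase
  let topDic := if topDic.getD i 0 == 0 then topDic.erase i else topDic
  let answer := if PySem.List.len setDic == (PySem.Dict.size topDic : Int)
                then st.1 + 1 else st.1
  (answer, topDic, setDic)

def solution (topping : List Int) : Int :=
  (topping.foldl stepA (0, PySem.Dict.counter topping, PySem.Set.empty)).1

-- ===== PORT B =====
-- first pass (over reversed(topping)): append len(seen) after each add
def stepB1 (st : List Int × PySem.Set Int) (x : Int) : List Int × PySem.Set Int :=
  let seen := PySem.Set.add st.2 x
  (st.1 ++ [PySem.List.len seen], seen)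

-- second pass over enumerate(topping): compare len(left) with suf[i+1]
def stepB2 (suf : List Int) (st : Int × PySem.Set Int) (ix : Int × Int) : Int × PySem.Set Int :=
  let left := PySem.Set.add st.2 ix.2
  let answer := if PySem.List.len left == PySem.List.pyGetD suf (ix.1 + 1) 0
                then st.1 + 1 else st.1
  (answer, left)

def solution_alt (topping : List Int) : Int :=
  let p := topping.reverse.foldl stepB1 ([(0 : Int)], PySem.Set.empty)
  let suf := p.1.reverse
  ((PySem.List.enumerate topping 0).foldl (stepB2 suf) (0, PySem.Set.empty)).1

-- ===== PRECONDITION & SPEC =====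
def Spec_solution (topping : List Int) (out : Int) : Prop := out = solution_alt topping
instance (topping : List Int) (out : Int) : Decidable (Spec_solution topping out) := by unfold Spec_solution; infer_instance

-- ===== CLAIM (what is proved, stated in full; the proofs are below) =====
def Claim_equal_solution : Prop := ∀ (topping : List Int), Dom_solution topping → Spec_solution topping (solution topping)

-- ===== LEMMAS AND PROOFS =====

-- number of distinct elements
def dcnt (xs : List Int) : Nat := xs.toFinset.card

-- number of split points j ≥ m (0-based, split after position j) with equal distinct counts
def F (t : List Int) (m : Nat) : Int :=
  ((List.range (t.length - m)).countP
    (fun j => decide (dcnt (t.take (m + j + 1)) = dcnt (t.drop (m + j + 1)))) : Int)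

lemma len_ofList (xs : List Int) : (PySem.Set.ofList xs).length = dcnt xs := by
  have h1 : (PySem.Set.ofList xs).toFinset = xs.toFinset := by
    apply Finset.ext; intro a; simp [List.mem_toFinset, PySem.Set.mem_ofList]
  have := List.toFinset_card_of_nodup (PySem.Set.nodup_ofList xs)
  unfold dcnt; rw [← h1, this]

lemma ofList_append_singleton (p : List Int) (x : Int) :
    PySem.Set.ofList (p ++ [x]) = PySem.Set.add (PySem.Set.ofList p) x := by
  simp [PySem.Set.ofList_eq_foldl, List.foldl_append]

-- erase on the Dict internals
lemma find?_filter_ne (k y : Int) (items : List (Int × Int)) :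
    List.find? (fun p => p.1 == y) (items.filter (fun p => !(p.1 == k))) =
    if y = k then none else List.find? (fun p => p.1 == y) items := by
  induction items with
  | nil => by_cases hyk : y = k <;> simp [hyk]
  | cons p rest ih =>
    rw [List.filter_cons]
    by_cases hpk : p.1 = k
    · rw [if_neg (by simp [hpk]), ih]
      by_cases hyk : y = k
      · simp [hyk]
      · rw [if_neg hyk, if_neg hyk, List.find?_cons_of_neg (by simp [hpk]; exact fun h => hyk h.symm)]
    · rw [if_pos (by simp [hpk])]
      by_cases hpy : p.1 = y
      · have hyk : ¬ y = k := fun h => hpk (hpy.trans h)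
        rw [if_neg hyk, List.find?_cons_of_pos (by simp [hpy]),
            List.find?_cons_of_pos (by simp [hpy])]
      · rw [List.find?_cons_of_neg (by simp [hpy]), ih]
        by_cases hyk : y = k
        · simp [hyk]
        · rw [if_neg hyk, if_neg hyk, List.find?_cons_of_neg (by simp [hpy])]

lemma get?_erase (d : PySem.Dict Int Int) (k y : Int) :
    (d.erase k).get? y = if y = k then none else d.get? y := by
  obtain ⟨items⟩ := d
  unfold PySem.Dict.erase PySem.Dict.get?
  simp only
  rw [find?_filter_ne]
  by_cases hyk : y = k <;> simp [hyk]

lemma keys_erase (d : PySem.Dict Int Int) (k : Int) :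
    (d.erase k).keys = d.keys.filter (fun a => !(a == k)) := by
  obtain ⟨items⟩ := d
  unfold PySem.Dict.erase PySem.Dict.keys
  simp only
  induction items with
  | nil => simp
  | cons p rest ih =>
    by_cases hpk : p.1 = k <;> simp [List.filter_cons, hpk, ih]

lemma contains_erase (d : PySem.Dict Int Int) (k y : Int) :
    (d.erase k).contains y = if y = k then false else d.contains y := by
  have h1 := PySem.Dict.contains_eq_isSome_get? (d := d.erase k) (k := y)
  have h2 := PySem.Dict.contains_eq_isSome_get? (d := d) (k := y)
  rw [h1, get?_erase, h2]
  by_cases hyk : y = k <;> simp [hyk]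

lemma size_eq_keys_length (d : PySem.Dict Int Int) : d.size = d.keys.length := by
  obtain ⟨items⟩ := d; simp [PySem.Dict.size, PySem.Dict.keys]

-- the Counter invariant A's loop maintains: d is Counter(s) with zero-count keys removed
def DInv (d : PySem.Dict Int Int) (s : List Int) : Prop :=
  d.keys.Nodup ∧ (∀ x, d.getD x 0 = (s.count x : Int)) ∧
    (∀ x, d.contains x = decide (x ∈ s))

lemma size_of_DInv (d : PySem.Dict Int Int) (s : List Int) (h : DInv d s) :
    d.size = dcnt s := by
  obtain ⟨hnd, _, hc⟩ := h
  have hmem : ∀ x, x ∈ d.keys ↔ x ∈ s := by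
    intro x
    rw [← PySem.Dict.contains_iff_mem_keys, hc]
    simp
  have h1 : d.keys.toFinset = s.toFinset := by
    apply Finset.ext; intro a; simp [List.mem_toFinset, hmem]
  rw [size_eq_keys_length, ← List.toFinset_card_of_nodup hnd, h1]; rfl

-- one step of A preserves the invariant
lemma DInv_step (d : PySem.Dict Int Int) (x : Int) (s : List Int) (h : DInv d (x :: s)) :
    DInv (if (d.modify x 0 (· - 1)).getD x 0 == 0
          then (d.modify x 0 (· - 1)).erase x else d.modify x 0 (· - 1)) s := by
  obtain ⟨hnd, hg, hc⟩ := h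
  have hgx : ∀ y, (d.modify x 0 (· - 1)).getD y 0 = (s.count y : Int) := by
    intro y
    rw [PySem.Dict.getD_modify]
    by_cases hyx : y = x
    · subst hyx; rw [if_pos rfl, hg]; simp [List.count_cons]
    · rw [if_neg hyx, hg]
      have hxy : ¬ x = y := fun h => hyx h.symm
      simp [List.count_cons, hxy]
  have hcx : ∀ y, (d.modify x 0 (· - 1)).contains y = decide (y ∈ x :: s) := by
    intro y
    rw [PySem.Dict.contains_modify, hc]
    by_cases hyx : y = x <;> simp [hyx]
  have hndx : (d.modify x 0 (· - 1)).keys.Nodup := by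
    rw [PySem.Dict.keys_modify]
    exact (PySem.Dict.nodup_keys_insert _ _ _ hnd)
  by_cases h0 : (s.count x : Int) = 0
  · have hcount : s.count x = 0 := by exact_mod_cast h0
    have hxns : x ∉ s := List.count_eq_zero.mp hcount
    rw [if_pos (by rw [hgx]; simp [h0])]
    refine ⟨?_, ?_, ?_⟩
    · rw [keys_erase]; exact hndx.filter _
    · intro y
      rw [PySem.Dict.getD_eq_get?_getD, get?_erase]
      by_cases hyx : y = x
      · subst hyx; simp [hcount]
      · rw [if_neg hyx, ← PySem.Dict.getD_eq_get?_getD, hgx]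
    · intro y
      rw [contains_erase]
      by_cases hyx : y = x
      · subst hyx; simp [hxns]
      · rw [if_neg hyx, hcx]; simp [hyx]
  · rw [if_neg (by rw [hgx]; simpa using h0)]
    refine ⟨hndx, hgx, ?_⟩
    intro y
    rw [hcx]
    by_cases hyx : y = x
    · subst hyx
      have hne : s.count y ≠ 0 := by exact_mod_cast h0
      have hmem : y ∈ s := List.count_pos_iff.mp (Nat.pos_of_ne_zero hne)
      simp [hmem]
    · simp [List.mem_cons, hyx]

-- peeling one split point off F
lemma F_succ (t : List Int) (m : Nat) (h : m < t.length) :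
    F t m = (if dcnt (t.take (m + 1)) = dcnt (t.drop (m + 1)) then (1 : Int) else 0)
            + F t (m + 1) := by
  unfold F
  have hk : t.length - m = (t.length - (m + 1)) + 1 := by omega
  rw [hk, List.range_succ_eq_map, List.countP_cons, List.countP_map]
  have harg : ∀ j : Nat, m + (Nat.succ j) + 1 = (m + 1) + j + 1 := by intro j; omega
  have hfun : ((fun j => decide (dcnt (t.take (m + j + 1)) = dcnt (t.drop (m + j + 1)))) ∘ Nat.succ)
      = (fun j => decide (dcnt (t.take ((m + 1) + j + 1)) = dcnt (t.drop ((m + 1) + j + 1)))) := by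
    funext j; simp [Function.comp, harg j]
  rw [hfun]
  by_cases hcond : dcnt (t.take (m + 1)) = dcnt (t.drop (m + 1)) <;>
    simp [hcond] <;> push_cast <;> omega

-- A's loop computes F
lemma A_loop (s : List Int) : ∀ (p : List Int) (a : Int) (d : PySem.Dict Int Int),
    DInv d s →
    (s.foldl stepA (a, d, PySem.Set.ofList p)).1 = a + F (p ++ s) p.length := by
  induction s with
  | nil =>
    intro p a d _
    simp [F]
  | cons x s' ih =>
    intro p a d hd
    have hstep := DInv_step d x s' hd
    have hlen : (p ++ x :: s').length = p.length + 1 + s'.length := by simp; omega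
    have htake : (p ++ x :: s').take (p.length + 1) = p ++ [x] := by
      have : p ++ x :: s' = (p ++ [x]) ++ s' := by simp
      rw [this, List.take_left' (by simp)]
    have hdrop : (p ++ x :: s').drop (p.length + 1) = s' := by
      have : p ++ x :: s' = (p ++ [x]) ++ s' := by simp
      rw [this, List.drop_left' (by simp)]
    set d2 := if (d.modify x 0 (· - 1)).getD x 0 == 0
              then (d.modify x 0 (· - 1)).erase x else d.modify x 0 (· - 1) with hd2
    have hsz : d2.size = dcnt s' := size_of_DInv d2 s' hstep
    have hset : PySem.Set.add (PySem.Set.ofList p) x = PySem.Set.ofList (p ++ [x]) :=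
      (ofList_append_singleton p x).symm
    have hcond : (PySem.List.len (PySem.Set.ofList (p ++ [x])) == (d2.size : Int))
        = decide (dcnt ((p ++ x :: s').take (p.length + 1)) = dcnt ((p ++ x :: s').drop (p.length + 1))) := by
      rw [htake, hdrop, hsz, PySem.List.len_eq, len_ofList]
      by_cases hc : dcnt (p ++ [x]) = dcnt s' <;> simp [hc]
    have hA : List.foldl stepA (a, d, PySem.Set.ofList p) (x :: s')
        = List.foldl stepA
            ((if PySem.List.len (PySem.Set.ofList (p ++ [x])) == (d2.size : Int) then a + 1 else a),
             d2, PySem.Set.ofList (p ++ [x])) s' := by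
      simp only [List.foldl_cons]
      congr 1
      simp only [stepA, hset, hd2]
    rw [hA, ih (p ++ [x]) _ d2 hstep]
    have hm : (p ++ [x]).length = p.length + 1 := by simp
    rw [hm]
    have hpl : p.length < (p ++ x :: s').length := by simp
    have h2 : (p ++ [x]) ++ s' = p ++ x :: s' := by simp
    rw [h2, F_succ (p ++ x :: s') p.length hpl, hcond]
    simp only [decide_eq_true_eq]
    split_ifs <;> ring

lemma DInv_counter (t : List Int) : DInv (PySem.Dict.counter t) t := by
  refine ⟨PySem.Dict.nodup_keys_counter t, ?_, ?_⟩
  · intro x; rw [PySem.Dict.getD_counter]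
  · intro x; rw [PySem.Dict.contains_counter]; simp

lemma solution_eq_F (t : List Int) : solution t = F t 0 := by
  unfold solution
  have h := A_loop t [] 0 (PySem.Dict.counter t) (DInv_counter t)
  simpa [PySem.Set.ofList] using h

-- ===== B side =====

-- the first pass appends the running distinct counts
lemma B1_loop (r : List Int) : ∀ (acc q : List Int),
    r.foldl stepB1 (acc, PySem.Set.ofList q)
      = (acc ++ (List.range r.length).map (fun j => ((dcnt (q ++ r.take (j + 1))) : Int)),
         PySem.Set.ofList (q ++ r)) := by
  induction r with
  | nil => intro acc q; simp
  | cons x r' ih =>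
    intro acc q
    have hstep : stepB1 (acc, PySem.Set.ofList q) x
        = (acc ++ [(dcnt (q ++ [x]) : Int)], PySem.Set.ofList (q ++ [x])) := by
      simp only [stepB1, ← ofList_append_singleton, PySem.List.len_eq, len_ofList]
    rw [List.foldl_cons, hstep, ih]
    simp only [Prod.mk.injEq]
    constructor
    · rw [List.append_assoc]
      congr 1
      simp only [List.length_cons, List.range_succ_eq_map, List.map_cons, List.map_map,
                 List.singleton_append, List.cons.injEq]
      refine ⟨by simp, ?_⟩
      apply List.map_congr_left
      intro j _
      simp [Function.comp, List.take_succ_cons]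
    · simp

-- the reversed first-pass output is the suffix-distinct-count table
lemma suf_eq (t : List Int) :
    ((0 : Int) :: (List.range t.reverse.length).map
        (fun j => ((dcnt ([] ++ t.reverse.take (j + 1))) : Int))).reverse
      = (List.range (t.length + 1)).map (fun k => ((dcnt (t.drop k)) : Int)) := by
  apply List.ext_getElem?
  intro i
  by_cases hi : i < t.length + 1
  · rw [List.getElem?_reverse (by simp; omega)]
    have hL : ((0 : Int) :: (List.range t.reverse.length).map
        (fun j => ((dcnt ([] ++ t.reverse.take (j + 1))) : Int))).length - 1 - i
        = t.length - i := by simp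
    rw [hL]
    rcases Nat.lt_or_ge i t.length with hlt | hge
    · obtain ⟨m, hm⟩ : ∃ m, t.length - i = m + 1 := ⟨t.length - i - 1, by omega⟩
      rw [hm, List.getElem?_cons_succ, List.getElem?_map,
          List.getElem?_range (show m < t.reverse.length by simp; omega),
          List.getElem?_map, List.getElem?_range (by omega)]
      simp only [Option.map_some]
      congr 1
      have hm1 : m + 1 = t.length - i := by omega
      rw [List.nil_append, hm1, List.take_reverse]
      have hidx : t.length - (t.length - i) = i := by omega
      rw [hidx]
      unfold dcnt
      rw [List.toFinset_reverse]
    · have hieq : i = t.length := by omega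
      subst hieq
      rw [Nat.sub_self, List.getElem?_cons_zero, List.getElem?_map,
          List.getElem?_range (by omega)]
      simp [dcnt]
  · rw [List.getElem?_eq_none (by simp; omega), List.getElem?_eq_none (by simp; omega)]

lemma getD_map_range_drop (t : List Int) (k : Nat) (hk : k ≤ t.length) :
    ((List.range (t.length + 1)).map (fun k => ((dcnt (t.drop k)) : Int))).getD k 0
      = (dcnt (t.drop k) : Int) := by
  rw [List.getD_eq_getElem?_getD, List.getElem?_map, List.getElem?_range (by omega)]
  simp

-- B's second pass computes F
lemma B2_loop (t : List Int) (s : List Int) : ∀ (p : List Int) (a : Int), p ++ s = t →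
    ((PySem.List.enumerate s (p.length : Int)).foldl
        (stepB2 ((List.range (t.length + 1)).map (fun k => ((dcnt (t.drop k)) : Int))))
        (a, PySem.Set.ofList p)).1
      = a + F t p.length := by
  induction s with
  | nil =>
    intro p a hpt
    have : t.length = p.length := by rw [← hpt]; simp
    simp [PySem.List.enumerate, F, this]
  | cons x s' ih =>
    intro p a hpt
    have hpl : p.length < t.length := by rw [← hpt]; simp
    have htake : t.take (p.length + 1) = p ++ [x] := by
      rw [← hpt]
      have : p ++ x :: s' = (p ++ [x]) ++ s' := by simp
      rw [this, List.take_left' (by simp)]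
    have hdrop : t.drop (p.length + 1) = s' := by
      rw [← hpt]
      have : p ++ x :: s' = (p ++ [x]) ++ s' := by simp
      rw [this, List.drop_left' (by simp)]
    rw [PySem.List.enumerate_cons, List.foldl_cons]
    have hget : PySem.List.pyGetD
        ((List.range (t.length + 1)).map (fun k => ((dcnt (t.drop k)) : Int)))
        ((p.length : Int) + 1) 0 = (dcnt s' : Int) := by
      have hcast : ((p.length : Int) + 1) = ((p.length + 1 : Nat) : Int) := by push_cast; ring
      rw [hcast, PySem.List.pyGetD_natCast, getD_map_range_drop t (p.length + 1) (by omega), hdrop]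
    have hstep : stepB2 ((List.range (t.length + 1)).map (fun k => ((dcnt (t.drop k)) : Int)))
        (a, PySem.Set.ofList p) ((p.length : Int), x)
        = ((if (dcnt (p ++ [x]) : Int) == (dcnt s' : Int) then a + 1 else a),
           PySem.Set.ofList (p ++ [x])) := by
      simp only [stepB2, ← ofList_append_singleton, PySem.List.len_eq, len_ofList, hget]
    have hstart : (p.length : Int) + 1 = ((p ++ [x]).length : Int) := by
      simp
    rw [hstep, hstart, ih (p ++ [x]) _ (by simp [← hpt])]
    have hm : (p ++ [x]).length = p.length + 1 := by simp
    rw [hm, F_succ t p.length hpl, htake, hdrop]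
    by_cases hc : dcnt (p ++ [x]) = dcnt s' <;> simp [hc] <;> ring

lemma solution_alt_eq_F (t : List Int) : solution_alt t = F t 0 := by
  unfold solution_alt
  simp only
  have h1 := B1_loop t.reverse [(0 : Int)] []
  have hofnil : (PySem.Set.ofList ([] : List Int)) = PySem.Set.empty := rfl
  rw [← hofnil] at *
  have hsuf : (t.reverse.foldl stepB1 ([(0 : Int)], PySem.Set.ofList [])).1.reverse
      = (List.range (t.length + 1)).map (fun k => ((dcnt (t.drop k)) : Int)) := by
    rw [h1]
    simpa using suf_eq t
  rw [hsuf]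
  have h2 := B2_loop t t [] 0 (by simp)
  simpa using h2

-- ===== VERDICT (by name: the statement is the Claim_ definition above) =====
theorem solution_spec : Claim_equal_solution := by
  intro topping _
  unfold Spec_solution
  rw [solution_eq_F, solution_alt_eq_F]
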